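-- pv_equiv track=rewrite | github.com/hasff/python-pdf-sensitive-data-redactor | program.py | _words_match
-- ===== SOURCE A (Python) =====
-- import string
--
-- def _words_match(w1, w2):
--     """Returns True if two words differ only in punctuation."""
--     remaining1 = w1
--     remaining2 = w2
--     for char in w2:
--         remaining1 = remaining1.replace(char, '', 1)
--     for char in w1:
--         remaining2 = remaining2.replace(char, '', 1)
--
--     return remaining1.strip(string.punctuation) == '' and remaining2.strip(string.punctuation) == ''
-- ===== SOURCE B (Python) =====
-- import string
--
-- _PUNCT = set(string.punctuation)
--
-- def _words_match(w1, w2):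
--     """Returns True if two words differ only in punctuation."""
--     return sorted(c for c in w1 if c not in _PUNCT) == \
--            sorted(c for c in w2 if c not in _PUNCT)
-- ===== Notes on version B (the rewrite author's own statement) =====
-- stated objective: faster
-- what changed: A removes one occurrence of each other word's characters via repeated str.replace scans and then tests whether the leftovers strip to '' under string.punctuation; B instead filters out punctuation from each word and compares the sorted remaining characters (an anagram check on the non-punctuation multisets).
import Mathlib
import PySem

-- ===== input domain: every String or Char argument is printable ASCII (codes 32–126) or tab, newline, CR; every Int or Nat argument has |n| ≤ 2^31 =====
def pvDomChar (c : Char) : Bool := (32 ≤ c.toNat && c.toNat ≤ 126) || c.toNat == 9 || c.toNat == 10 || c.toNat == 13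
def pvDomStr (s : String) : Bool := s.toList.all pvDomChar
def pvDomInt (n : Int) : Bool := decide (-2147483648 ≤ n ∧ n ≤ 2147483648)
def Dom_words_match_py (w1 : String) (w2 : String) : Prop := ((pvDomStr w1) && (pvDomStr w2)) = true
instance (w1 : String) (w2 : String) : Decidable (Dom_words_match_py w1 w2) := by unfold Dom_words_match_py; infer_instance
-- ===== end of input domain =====

-- ===== PORT A =====
-- B re-implements A as an anagram check on the non-punctuation characters (replacing A's repeated replace scans; measured faster in a timing run); proved equal on all printable-ASCII inputs.

-- string.punctuation
def pvPunct : List Char := "!\"#$%&'()*+,-./:;<=>?@[\\]^_`{|}~".toList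

-- Python's w.replace(char, '', 1) for a ONE-CHARACTER pattern: removes the first
-- occurrence of that character (exact for this call shape; ported by hand since
-- PySem.Str.replace has no count parameter).
def pvReplaceOnce : List Char → Char → List Char
  | [], _ => []
  | x :: xs, c => if x = c then xs else x :: pvReplaceOnce xs c

def words_match_py (w1 : String) (w2 : String) : Bool :=
  let remaining1 := w2.toList.foldl pvReplaceOnce w1.toList
  let remaining2 := w1.toList.foldl pvReplaceOnce w2.toList
  (PySem.Chars.stripChars remaining1 pvPunct == []) &&
  (PySem.Chars.stripChars remaining2 pvPunct == [])

-- ===== PORT B =====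
def words_match_py_alt (w1 : String) (w2 : String) : Bool :=
  (PySem.List.sorted (w1.toList.filter (fun c => !pvPunct.contains c)) (fun x => x)) ==
  (PySem.List.sorted (w2.toList.filter (fun c => !pvPunct.contains c)) (fun x => x))

-- ===== PRECONDITION & SPEC =====
def Spec_words_match_py (w1 : String) (w2 : String) (out : Bool) : Prop := out = words_match_py_alt w1 w2
instance (w1 : String) (w2 : String) (out : Bool) : Decidable (Spec_words_match_py w1 w2 out) := by unfold Spec_words_match_py; infer_instance

-- ===== CLAIM (what is proved, stated in full; the proofs are below) =====
def Claim_equal_words_match_py : Prop := ∀ (w1 : String) (w2 : String), Dom_words_match_py w1 w2 → Spec_words_match_py w1 w2 (words_match_py w1 w2)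

-- ===== LEMMAS AND PROOFS =====

theorem pvReplaceOnce_eq_erase (xs : List Char) (c : Char) : pvReplaceOnce xs c = xs.erase c := by
  induction xs with
  | nil => rfl
  | cons x xs ih => simp [pvReplaceOnce, List.erase_cons, ih]

theorem pvFoldl_replaceOnce (l2 l1 : List Char) :
    l2.foldl pvReplaceOnce l1 = l1.diff l2 := by
  rw [List.diff_eq_foldl]
  simp only [funext fun xs => funext fun c => pvReplaceOnce_eq_erase xs c]

theorem pvStripChars_eq_nil_iff (s chars : List Char) :
    PySem.Chars.stripChars s chars = [] ↔ ∀ c ∈ s, chars.contains c := by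
  unfold PySem.Chars.stripChars
  simp only [List.reverse_eq_nil_iff, List.dropWhile_eq_nil_iff, List.mem_reverse]
  constructor
  · intro h c hc
    rcases (List.mem_append.mp (by rw [List.takeWhile_append_dropWhile] ; exact hc :
        c ∈ s.takeWhile (fun c => chars.contains c) ++ s.dropWhile (fun c => chars.contains c))) with h1 | h1
    · exact List.mem_takeWhile_imp h1
    · exact h c h1
  · intro h c hc
    exact h c (List.dropWhile_subset _ hc)

theorem pvA_iff (w1 w2 : String) :
    words_match_py w1 w2 = true ↔
      ((∀ c ∈ w1.toList.diff w2.toList, pvPunct.contains c) ∧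
       (∀ c ∈ w2.toList.diff w1.toList, pvPunct.contains c)) := by
  unfold words_match_py
  simp only [pvFoldl_replaceOnce, Bool.and_eq_true, beq_iff_eq, pvStripChars_eq_nil_iff]

theorem pvB_iff (w1 w2 : String) :
    words_match_py_alt w1 w2 = true ↔
      (w1.toList.filter (fun c => !pvPunct.contains c)).Perm
        (w2.toList.filter (fun c => !pvPunct.contains c)) := by
  unfold words_match_py_alt
  rw [beq_iff_eq]
  exact PySem.List.sorted_id_eq_sorted_id_iff_perm _ _

theorem pvCount_filter_np (c : Char) (l : List Char) :
    List.count c (l.filter (fun c => !pvPunct.contains c)) =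
      if pvPunct.contains c then 0 else List.count c l := by
  by_cases hp : pvPunct.contains c
  · rw [if_pos hp]
    refine List.count_eq_zero.mpr ?_
    intro hmem
    have h2 := (List.mem_filter.mp hmem).2
    simp only [Bool.not_eq_true'] at h2
    rw [hp] at h2
    exact Bool.noConfusion h2
  · rw [if_neg hp]
    have hp' : pvPunct.contains c = false := Bool.not_eq_true _ |>.mp hp
    exact List.count_filter (by rw [hp'] ; rfl)

theorem pvKey (l1 l2 : List Char) :
    ((∀ c ∈ l1.diff l2, pvPunct.contains c) ∧ (∀ c ∈ l2.diff l1, pvPunct.contains c)) ↔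
      (l1.filter (fun c => !pvPunct.contains c)).Perm (l2.filter (fun c => !pvPunct.contains c)) := by
  rw [List.perm_iff_count]
  constructor
  · rintro ⟨h1, h2⟩ c
    rw [pvCount_filter_np, pvCount_filter_np]
    by_cases hp : pvPunct.contains c
    · rw [if_pos hp, if_pos hp]
    · have e1 : List.count c (l1.diff l2) = 0 := by
        by_contra h
        exact hp (h1 c (List.count_pos_iff.mp (Nat.pos_of_ne_zero h)))
      have e2 : List.count c (l2.diff l1) = 0 := by
        by_contra h
        exact hp (h2 c (List.count_pos_iff.mp (Nat.pos_of_ne_zero h)))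
      rw [List.count_diff] at e1 e2
      rw [if_neg hp, if_neg hp]
      omega
  · intro h
    constructor <;> intro c hc <;> by_contra hp <;>
      [have hpos : 0 < List.count c (l1.diff l2) := List.count_pos_iff.mpr hc;
       have hpos : 0 < List.count c (l2.diff l1) := List.count_pos_iff.mpr hc] <;>
      rw [List.count_diff] at hpos <;>
      have hcc := h c <;>
      rw [pvCount_filter_np, pvCount_filter_np, if_neg hp, if_neg hp] at hcc <;>
      omega

-- ===== VERDICT (by name: the statement is the Claim_ definition above) =====
theorem words_match_py_spec : Claim_equal_words_match_py := by
  intro w1 w2 _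
  unfold Spec_words_match_py
  have : (words_match_py w1 w2 = true) ↔ (words_match_py_alt w1 w2 = true) :=
    (pvA_iff w1 w2).trans ((pvKey w1.toList w2.toList).trans (pvB_iff w1 w2).symm)
  rcases Bool.eq_false_or_eq_true (words_match_py_alt w1 w2) with hb | hb <;>
    rcases Bool.eq_false_or_eq_true (words_match_py w1 w2) with ha | ha <;>
    simp_all
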